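-- pv_equiv track=rewrite | github.com/SonJinHYo/CodingTest | 프로그래머스/lv2/87390. n＾2 배열 자르기/n＾2 배열 자르기.py | solution
-- ===== SOURCE A (Python) =====
-- def solution(n, left, right):
--     # left와 rigth의 원래 행,열 위치를 저장
--     L_row, L_col = left//n, left%n
--     R_row, R_col = right//n, right%n
--
--     answer = []
--     # L행~R행 부분만 리스트로 만든다.
--     # 리스트 원소값은 행값+1 보다 작으면 행값+1, 이후로는 1씩 커지는 리스트이다.
--     for r in range(L_row,R_row+1):
--         answer+=[i if i>(r+1) else (r+1) for i in range(1,n+1)]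
--     # L열,R열 값을 이용해 앞 뒤를 잘라서 반환.
--     # 열만큼 앞뒤로 각각 잘라주면되고, (n-R_col) 이 0일수 있으므로 원소를 하나 추가해서 잘라준다.
--     answer+=[0]
--     return answer[L_col:-(n-R_col)]
-- ===== SOURCE B (Python) =====
-- def solution(n, left, right):
--     return [max(k // n, k % n) + 1 for k in range(left, right + 1)]
-- ===== Notes on version B (the rewrite author's own statement) =====
-- stated objective: alternative
-- what changed: Instead of materialising all rows L_row..R_row of the n x n matrix and slicing the concatenation, B computes each requested element directly as max(k//n, k%n)+1 for k in range(left, right+1).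
-- outside the precondition, e.g. on solution(0, 1, 3): A raises ZeroDivisionError, B raises ZeroDivisionError; on solution(-2, -10, -4): A returns [0], B returns [6, 5, 5, 4, 4, 3, 3]
import Mathlib
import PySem

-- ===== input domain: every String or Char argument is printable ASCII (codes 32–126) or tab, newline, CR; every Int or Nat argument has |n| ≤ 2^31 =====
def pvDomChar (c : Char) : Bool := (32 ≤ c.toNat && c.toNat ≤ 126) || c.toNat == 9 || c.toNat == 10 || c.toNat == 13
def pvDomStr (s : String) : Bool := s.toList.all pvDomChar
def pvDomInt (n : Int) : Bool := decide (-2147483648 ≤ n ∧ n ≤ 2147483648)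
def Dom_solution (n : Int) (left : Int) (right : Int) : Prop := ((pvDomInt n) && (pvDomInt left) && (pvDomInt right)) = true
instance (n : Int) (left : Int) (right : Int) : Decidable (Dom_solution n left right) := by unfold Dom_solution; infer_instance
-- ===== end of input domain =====

-- B replaces A's row-building-and-slicing by a direct per-index formula max(k//n,k%n)+1 for k in [left,right] (objective: alternative).

-- ===== PORT A =====
def solution (n : Int) (left : Int) (right : Int) : List Int :=
  let L_row := PySem.Int.floordiv left n
  let L_col := PySem.Int.mod left n
  let R_row := PySem.Int.floordiv right n
  let R_col := PySem.Int.mod right n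
  let answer : List Int :=
    (PySem.List.pyRange L_row (R_row + 1)).foldl
      (fun acc r => acc ++ (PySem.List.pyRange 1 (n + 1)).map (fun i => if i > r + 1 then i else r + 1)) []
  let answer2 := answer ++ [0]
  PySem.List.slice answer2 (some L_col) (some (-(n - R_col)))

-- ===== PORT B =====
def solution_alt (n : Int) (left : Int) (right : Int) : List Int :=
  (PySem.List.pyRange left (right + 1)).map
    (fun k => max (PySem.Int.floordiv k n) (PySem.Int.mod k n) + 1)

-- ===== PRECONDITION & SPEC =====
-- Pre_ restricts to the natural domain of the task (n is the side of an n×n array): for n = 0 the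
-- Python A raises ZeroDivisionError, and for n < 0 A's answer is an accidental artefact of slicing
-- with negative-divisor floordiv/mod (e.g. it returns [0]).
def Pre_solution (n : Int) (left : Int) (right : Int) : Prop := 1 ≤ n
instance (n : Int) (left : Int) (right : Int) : Decidable (Pre_solution n left right) := by
  unfold Pre_solution; infer_instance
def pvWitness_solution : Int × Int × Int := (3, 2, 5)
def Spec_solution (n : Int) (left : Int) (right : Int) (out : List Int) : Prop := out = solution_alt n left right
instance (n : Int) (left : Int) (right : Int) (out : List Int) : Decidable (Spec_solution n left right out) := by unfold Spec_solution; infer_instance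

-- ===== CLAIM (what is proved, stated in full; the proofs are below) =====
def Claim_equal_solution : Prop := ∀ (n : Int) (left : Int) (right : Int), Dom_solution n left right → Pre_solution n left right → Spec_solution n left right (solution n left right)

-- ===== LEMMAS AND PROOFS =====

-- One row r of A's loop is exactly the direct formula applied to the flat indices r*n .. r*n+n-1.
theorem pv_row_block (n row : Int) (hn : 0 < n) :
    (PySem.List.pyRange 1 (n + 1)).map (fun i => if i > row + 1 then i else row + 1)
  = (PySem.List.pyRange (row * n) (row * n + n)).map
      (fun k => max (PySem.Int.floordiv k n) (PySem.Int.mod k n) + 1) := by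
  apply List.ext_getElem
  · simp [PySem.List.length_pyRange_one]
  · intro k h1 h2
    simp only [List.getElem_map, PySem.List.getElem_pyRange_one]
    have hk : (k : Int) < n := by
      simp [PySem.List.length_pyRange_one] at h1; omega
    have hq : PySem.Int.floordiv (row * n + (k : Int)) n = row := by
      rw [PySem.Int.floordiv_eq_iff_of_pos hn]
      constructor
      · linarith [Int.natCast_nonneg k]
      · have h : (row + 1) * n = row * n + n := by ring
        rw [h]; linarith
    have hm : PySem.Int.mod (row * n + (k : Int)) n = (k : Int) := by
      have h := PySem.Int.floordiv_mul_add_mod (row * n + (k : Int)) n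
      rw [hq] at h; linarith
    rw [hq, hm]
    split_ifs with h <;> omega

-- A's whole loop over rows a .. a+d-1 is the direct formula on flat indices a*n .. (a+d)*n-1.
theorem pv_rows_block (n : Int) (hn : 0 < n) :
    ∀ (d : Nat) (a : Int),
    (PySem.List.pyRange a (a + (d : Int))).flatMap
      (fun row => (PySem.List.pyRange 1 (n + 1)).map (fun i => if i > row + 1 then i else row + 1))
  = (PySem.List.pyRange (a * n) ((a + (d : Int)) * n)).map
      (fun k => max (PySem.Int.floordiv k n) (PySem.Int.mod k n) + 1) := by
  intro d
  induction d with
  | zero =>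
      intro a
      simp [PySem.List.pyRange_one_eq_nil (le_refl a), PySem.List.pyRange_one_eq_nil (le_refl (a * n))]
  | succ d ih =>
      intro a
      have hcast : a + ((d + 1 : Nat) : Int) = (a + (d : Int)) + 1 := by push_cast; ring
      rw [hcast]
      have h1 : a ≤ a + (d : Int) := by omega
      rw [PySem.List.pyRange_one_succ_right h1, List.flatMap_append, ih a]
      have hA : a * n ≤ (a + (d : Int)) * n :=
        mul_le_mul_of_nonneg_right (by omega) hn.le
      have hB : (a + (d : Int)) * n ≤ ((a + (d : Int)) + 1) * n :=
        mul_le_mul_of_nonneg_right (by omega) hn.le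
      rw [PySem.List.pyRange_one_append (a * n) ((a + (d : Int)) * n) (((a + (d : Int)) + 1) * n) hA hB,
          List.map_append]
      congr 1
      have h2 : ((a + (d : Int)) + 1) * n = (a + (d : Int)) * n + n := by ring
      rw [h2]
      simpa using pv_row_block n (a + (d : Int)) hn

theorem pv_main (n l r : Int) (hn : 0 < n) : solution n l r = solution_alt n l r := by
  have hLc0 : 0 ≤ PySem.Int.mod l n := PySem.Int.mod_nonneg l hn
  have hLcn : PySem.Int.mod l n < n := PySem.Int.mod_lt l hn
  have hRc0 : 0 ≤ PySem.Int.mod r n := PySem.Int.mod_nonneg r hn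
  have hRcn : PySem.Int.mod r n < n := PySem.Int.mod_lt r hn
  have hl : PySem.Int.floordiv l n * n + PySem.Int.mod l n = l := PySem.Int.floordiv_mul_add_mod l n
  have hr : PySem.Int.floordiv r n * n + PySem.Int.mod r n = r := PySem.Int.floordiv_mul_add_mod r n
  set Lr := PySem.Int.floordiv l n with hLrdef
  set Lc := PySem.Int.mod l n with hLcdef
  set Rr := PySem.Int.floordiv r n with hRrdef
  set Rc := PySem.Int.mod r n with hRcdef
  have e1 : solution n l r =
      PySem.List.slice
        (((PySem.List.pyRange Lr (Rr + 1)).foldl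
            (fun acc row => acc ++ (PySem.List.pyRange 1 (n + 1)).map
              (fun i => if i > row + 1 then i else row + 1)) []) ++ [0])
        (some Lc) (some (-(n - Rc))) := rfl
  rw [e1, PySem.List.foldl_append_eq_flatMap, List.nil_append]
  rcases le_or_gt Lr Rr with hLR | hLR
  · -- at least one row is generated
    obtain ⟨d, hd⟩ : ∃ d : Nat, (d : Int) = Rr + 1 - Lr := ⟨(Rr + 1 - Lr).toNat, Int.toNat_of_nonneg (by omega)⟩
    have hRr1 : Rr + 1 = Lr + (d : Int) := by omega
    rw [hRr1, pv_rows_block n hn d Lr]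
    set Q := Lr * n with hQ
    set P := (d : Int) * n with hPdef
    have hP : (Lr + (d : Int)) * n = Q + P := by rw [hQ, hPdef]; ring
    rw [hP]
    have hd1 : 1 ≤ (d : Int) := by omega
    have hnP : n ≤ P := by rw [hPdef]; nlinarith
    have hrQ : r = Q + P - n + Rc := by
      have h1 : Rr = Lr + (d : Int) - 1 := by omega
      have h2 : Rr * n = Q + P - n := by rw [h1, hQ, hPdef]; ring
      omega
    have hlQ : l = Q + Lc := by omega
    set X : List Int :=
      (PySem.List.pyRange Q (Q + P)).map
        (fun k => max (PySem.Int.floordiv k n) (PySem.Int.mod k n) + 1) ++ [0] with hX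
    have hXlen : (X.length : Int) = P + 1 := by
      rw [hX]
      simp [PySem.List.length_pyRange_one]
      omega
    have hcA : PySem.List.clampIdx X.length Lc = Lc.toNat := by
      unfold PySem.List.clampIdx
      rw [if_neg (by omega)]
      omega
    have hcB : PySem.List.clampIdx X.length (-(n - Rc)) = (P + 1 - n + Rc).toNat := by
      unfold PySem.List.clampIdx
      rw [if_pos (by omega), if_neg (by omega)]
      omega
    have e2 : PySem.List.slice X (some Lc) (some (-(n - Rc)))
        = (X.drop (PySem.List.clampIdx X.length Lc)).take
            (PySem.List.clampIdx X.length (-(n - Rc)) - PySem.List.clampIdx X.length Lc) := rfl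
    rw [e2, hcA, hcB]
    set A := Lc.toNat with hAdef
    set B := (P + 1 - n + Rc).toNat with hBdef
    have hAi : (A : Int) = Lc := by omega
    have hBi : (B : Int) = P + 1 - n + Rc := by omega
    have hAle : A ≤ ((PySem.List.pyRange Q (Q + P)).map
        (fun k => max (PySem.Int.floordiv k n) (PySem.Int.mod k n) + 1)).length := by
      rw [List.length_map, PySem.List.length_pyRange_one]; omega
    have hTke : B - A ≤ (((PySem.List.pyRange Q (Q + P)).map
        (fun k => max (PySem.Int.floordiv k n) (PySem.Int.mod k n) + 1)).drop A).length := by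
      rw [List.length_drop, List.length_map, PySem.List.length_pyRange_one]; omega
    rw [hX, List.drop_append_of_le_length hAle, List.take_append_of_le_length hTke]
    rw [← List.map_drop, ← List.map_take]
    have hfinal : List.take (B - A) (List.drop A (PySem.List.pyRange Q (Q + P)))
        = PySem.List.pyRange l (r + 1) := by
      apply List.ext_getElem
      · rw [List.length_take, List.length_drop, PySem.List.length_pyRange_one,
            PySem.List.length_pyRange_one]
        omega
      · intro k h1 h2
        simp only [List.getElem_take, List.getElem_drop, PySem.List.getElem_pyRange_one]
        push_cast
        omega
    rw [hfinal]
    rfl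
  · -- no row is generated: both sides are []
    have hempty : PySem.List.pyRange Lr (Rr + 1) = [] := PySem.List.pyRange_one_eq_nil (by omega)
    rw [hempty, List.flatMap_nil]
    have hrl : r < l := by
      have h1 : (Rr + 1) * n ≤ Lr * n := mul_le_mul_of_nonneg_right (by omega) hn.le
      have h2 : (Rr + 1) * n = Rr * n + n := by ring
      have h3 : Rr * n + Rc < Rr * n + n := by omega
      linarith
    have hcB : PySem.List.clampIdx ([] ++ [(0 : Int)]).length (-(n - Rc)) = 0 := by
      unfold PySem.List.clampIdx
      simp only [List.nil_append, List.length_cons, List.length_nil]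
      rw [if_pos (by omega)]
      split_ifs <;> omega
    have e2 : PySem.List.slice ([] ++ [(0 : Int)]) (some Lc) (some (-(n - Rc)))
        = (([] ++ [(0 : Int)]).drop (PySem.List.clampIdx ([] ++ [(0 : Int)]).length Lc)).take
            (PySem.List.clampIdx ([] ++ [(0 : Int)]).length (-(n - Rc))
              - PySem.List.clampIdx ([] ++ [(0 : Int)]).length Lc) := rfl
    rw [e2, hcB]
    have hB : PySem.List.pyRange l (r + 1) = [] := PySem.List.pyRange_one_eq_nil (by omega)
    simp [solution_alt, hB]

-- ===== VERDICT (by name: the statement is the Claim_ definition above) =====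
theorem solution_spec : Claim_equal_solution := by
  intro n l r _ hpre
  show solution n l r = solution_alt n l r
  exact pv_main n l r (by exact hpre)
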